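-- pv_equiv track=rewrite | github.com/jsandeman/Relational-Actualism | src/RA_AQFT/RA_BDG_Simulation.py | bdg_score
-- ===== SOURCE A (Python) =====
-- def bdg_score(past, v):
--     """S_BDG(v) and N-vector for vertex v."""
--     N = [0] * 5   # N[1]..N[4]
--     for x in past[v]:
--         between = sum(1 for z in past[v] if x in past[z])
--         k = between + 1
--         if 1 <= k <= 4:
--             N[k] += 1
--     score = 1 - N[1] + 9*N[2] - 16*N[3] + 8*N[4]
--     return score, N
-- ===== SOURCE B (Python) =====
-- def bdg_score(past, v):
--     """S_BDG(v) and N-vector for vertex v (inverted count-table pass)."""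
--     pv = past[v]
--     count = {x: 0 for x in pv}
--     for z in pv:
--         for y in set(past[z]):
--             if y in count:
--                 count[y] += 1
--     N = [0] * 5
--     for x in pv:
--         k = count[x] + 1
--         if 1 <= k <= 4:
--             N[k] += 1
--     score = 1 - N[1] + 9*N[2] - 16*N[3] + 8*N[4]
--     return score, N
-- ===== Notes on version B (the rewrite author's own statement) =====
-- stated objective: faster
-- what changed: Replaces the per-element rescan of all z in past[v] by one inverted population pass that builds a count table (for each z, bump count[y] for each distinct y in past[z] that is a value of past[v]) followed by a single classification pass.
import Mathlib
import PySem

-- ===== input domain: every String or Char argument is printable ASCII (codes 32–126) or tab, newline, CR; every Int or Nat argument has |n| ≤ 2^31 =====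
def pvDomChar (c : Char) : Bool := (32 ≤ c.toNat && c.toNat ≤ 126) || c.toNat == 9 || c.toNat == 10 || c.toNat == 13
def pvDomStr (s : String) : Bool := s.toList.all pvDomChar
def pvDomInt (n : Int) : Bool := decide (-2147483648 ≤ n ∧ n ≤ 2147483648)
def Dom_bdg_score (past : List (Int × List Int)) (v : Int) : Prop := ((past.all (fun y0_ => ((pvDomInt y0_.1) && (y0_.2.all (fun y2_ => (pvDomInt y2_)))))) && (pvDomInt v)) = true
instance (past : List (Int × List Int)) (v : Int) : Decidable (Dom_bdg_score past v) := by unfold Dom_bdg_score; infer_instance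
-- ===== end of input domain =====

-- B replaces A's quadratic 'for each x, rescan every z' by one inverted counting pass
-- over z (bumping a count table at each distinct member of past[z]) plus a
-- classification pass; same score and N-vector.

-- N[k] += 1 (both Pythons execute this statement only under 1 ≤ k ≤ 4, so k.toNat is the Python index)
def pvIncAt (N : List Int) (k : Int) : List Int :=
  N.set k.toNat (N.getD k.toNat 0 + 1)

-- ===== PORT A =====
def bdg_score (past : List (Int × List Int)) (v : Int) : Int × List Int :=
  let d := PySem.Dict.mk past
  let pv := PySem.Dict.getD d v []
  let N := pv.foldl (fun N x =>
      let between : Int := pv.foldl (fun acc z =>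
          if x ∈ PySem.Dict.getD d z [] then acc + 1 else acc) 0
      let k := between + 1
      if 1 ≤ k ∧ k ≤ 4 then pvIncAt N k else N) [0, 0, 0, 0, 0]
  (1 - N.getD 1 0 + 9 * N.getD 2 0 - 16 * N.getD 3 0 + 8 * N.getD 4 0, N)

-- ===== PORT B =====
def bdg_score_alt (past : List (Int × List Int)) (v : Int) : Int × List Int :=
  let d := PySem.Dict.mk past
  let pv := PySem.Dict.getD d v []
  let count0 : PySem.Dict Int Int := pv.foldl (fun c x => c.insert x 0) (PySem.Dict.empty : PySem.Dict Int Int)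
  let count := pv.foldl (fun c z =>
      (PySem.Set.ofList (PySem.Dict.getD d z [])).foldl (fun c y =>
        if c.contains y then c.modify y 0 (· + 1) else c) c) count0
  let N := pv.foldl (fun N x =>
      let k := PySem.Dict.getD count x 0 + 1
      if 1 ≤ k ∧ k ≤ 4 then pvIncAt N k else N) [0, 0, 0, 0, 0]
  (1 - N.getD 1 0 + 9 * N.getD 2 0 - 16 * N.getD 3 0 + 8 * N.getD 4 0, N)

-- ===== PRECONDITION & SPEC =====
-- Pre_ excludes exactly the inputs where the Python A raises KeyError: v must be a key
-- of past, and every element of past[v] must be a key of past.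
def Pre_bdg_score (past : List (Int × List Int)) (v : Int) : Prop :=
  (PySem.Dict.mk past).contains v = true ∧
  ∀ z ∈ PySem.Dict.getD (PySem.Dict.mk past) v [], (PySem.Dict.mk past).contains z = true
instance (past : List (Int × List Int)) (v : Int) : Decidable (Pre_bdg_score past v) := by
  unfold Pre_bdg_score; infer_instance

def pvWitness_bdg_score : (List (Int × List Int)) × Int := ([(0, [0, 1, 0]), (1, [0])], 0)

def Spec_bdg_score (past : List (Int × List Int)) (v : Int) (out : Int × List Int) : Prop := out = bdg_score_alt past v
instance (past : List (Int × List Int)) (v : Int) (out : Int × List Int) : Decidable (Spec_bdg_score past v out) := by unfold Spec_bdg_score; infer_instance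

-- ===== CLAIM (what is proved, stated in full; the proofs are below) =====
def Claim_equal_bdg_score : Prop := ∀ (past : List (Int × List Int)) (v : Int), Dom_bdg_score past v → Pre_bdg_score past v → Spec_bdg_score past v (bdg_score past v)

-- ===== LEMMAS AND PROOFS =====

-- the inner 'for y in set(past[z])' loop does not change which keys the table has
lemma pv_contains_incr_fold (ys : List Int) (c : PySem.Dict Int Int) (x : Int) :
    ((ys.foldl (fun c y => if c.contains y then c.modify y 0 (· + 1) else c) c).contains x)
      = c.contains x := by
  induction ys generalizing c with
  | nil => rfl
  | cons y ys ih =>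
    simp only [List.foldl_cons]
    by_cases hy : c.contains y = true
    · simp only [hy, if_true, ih]
      rw [PySem.Dict.contains_modify]
      by_cases hxy : x = y
      · subst hxy; simp [hy]
      · simp [hxy]
    · simp [hy, ih]

-- one inner pass bumps the count at x by 1 iff x ∈ ys (ys duplicate-free) and x is a key
lemma pv_getD_incr_fold (ys : List Int) (hnd : ys.Nodup) (c : PySem.Dict Int Int) (x : Int) :
    ((ys.foldl (fun c y => if c.contains y then c.modify y 0 (· + 1) else c) c).getD x 0)
      = if x ∈ ys ∧ c.contains x = true then c.getD x 0 + 1 else c.getD x 0 := by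
  induction ys generalizing c with
  | nil => simp
  | cons y ys ih =>
    rcases List.nodup_cons.mp hnd with ⟨hy_not, hnd'⟩
    simp only [List.foldl_cons]
    by_cases hy : c.contains y = true
    · simp only [hy, if_true]
      rw [ih hnd']
      by_cases hxy : x = y
      · subst hxy
        have hx_not : x ∉ ys := hy_not
        simp [hx_not, hy, PySem.Dict.getD_modify_self]
      · have h1 : (c.modify y 0 (· + 1)).contains x = c.contains x := by
          rw [PySem.Dict.contains_modify]; simp [hxy]
        have h2 : (c.modify y 0 (· + 1)).getD x 0 = c.getD x 0 :=
          PySem.Dict.getD_modify_of_ne _ _ _ hxy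
        rw [h1, h2]
        by_cases hmem : x ∈ ys <;> simp [hmem, hxy]
    · simp only [hy]
      rw [ih hnd']
      by_cases hxy : x = y
      · subst hxy; simp [hy]
      · by_cases hmem : x ∈ ys <;> simp [hmem, hxy]

-- the outer population pass: the final count at a key x is its start value plus the
-- number of z-occurrences in zs whose past[z] contains x
lemma pv_count_fold (d : PySem.Dict Int (List Int)) (zs : List Int)
    (c : PySem.Dict Int Int) (x : Int) (hx : c.contains x = true) :
    ((zs.foldl (fun c z =>
        (PySem.Set.ofList (PySem.Dict.getD d z [])).foldl
          (fun c y => if c.contains y then c.modify y 0 (· + 1) else c) c) c).getD x 0)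
      = c.getD x 0 + (zs.countP (fun z => decide (x ∈ PySem.Dict.getD d z []))) := by
  induction zs generalizing c with
  | nil => simp
  | cons z zs ih =>
    simp only [List.foldl_cons]
    set c' := (PySem.Set.ofList (PySem.Dict.getD d z [])).foldl
        (fun c y => if c.contains y then c.modify y 0 (· + 1) else c) c with hc'
    have hx' : c'.contains x = true := by rw [hc', pv_contains_incr_fold]; exact hx
    rw [ih c' hx']
    have hset := pv_getD_incr_fold (PySem.Set.ofList (PySem.Dict.getD d z []))
        (PySem.Set.nodup_ofList _) c x
    rw [hc', hset]
    by_cases hmem : x ∈ PySem.Dict.getD d z []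
    · have : x ∈ PySem.Set.ofList (PySem.Dict.getD d z []) :=
        (PySem.Set.mem_ofList _ _).mpr hmem
      simp [this, hx, hmem]
      ring
    · have : x ∉ PySem.Set.ofList (PySem.Dict.getD d z []) := by
        rw [PySem.Set.mem_ofList]; exact hmem
      simp [this, hmem]

-- the initializer {x: 0 for x in pv}
lemma pv_count0_getD (pv : List Int) (c : PySem.Dict Int Int) (x : Int) :
    ((pv.foldl (fun c x => c.insert x 0) c).getD x 0)
      = if x ∈ pv then 0 else c.getD x 0 := by
  induction pv generalizing c with
  | nil => simp
  | cons y ys ih =>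
    simp only [List.foldl_cons]
    rw [ih]
    by_cases hmem : x ∈ ys
    · simp [hmem]
    · by_cases hxy : x = y
      · subst hxy; simp [hmem, PySem.Dict.getD_insert_self]
      · simp [hmem, hxy, PySem.Dict.getD_insert_of_ne _ _ _ hxy]

lemma pv_count0_contains (pv : List Int) (x : Int) (hx : x ∈ pv) :
    ((pv.foldl (fun c x => c.insert x 0) (PySem.Dict.empty : PySem.Dict Int Int)).contains x) = true := by
  rw [PySem.Dict.contains_iff_mem_keys, PySem.Dict.keys_foldl_insert]
  rw [PySem.Set.mem_update]; right; exact hx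

-- ===== VERDICT (by name: the statement is the Claim_ definition above) =====
theorem bdg_score_spec : Claim_equal_bdg_score := by
  intro past v _ _
  unfold Spec_bdg_score bdg_score bdg_score_alt
  simp only []
  set d := PySem.Dict.mk past with hd
  set pv := PySem.Dict.getD d v [] with hpv
  have hcount : ∀ x ∈ pv,
      (PySem.Dict.getD (pv.foldl (fun c z =>
          (PySem.Set.ofList (PySem.Dict.getD d z [])).foldl
            (fun c y => if c.contains y then c.modify y 0 (· + 1) else c) c)
          (pv.foldl (fun c x => c.insert x 0) (PySem.Dict.empty : PySem.Dict Int Int))) x 0)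
        = (pv.countP (fun z => decide (x ∈ PySem.Dict.getD d z [])) : Int) := by
    intro x hx
    rw [pv_count_fold d pv _ x (pv_count0_contains pv x hx)]
    rw [pv_count0_getD]
    simp [hx]
  have hN : (pv.foldl (fun N x =>
        let between : Int := pv.foldl (fun acc z =>
            if x ∈ PySem.Dict.getD d z [] then acc + 1 else acc) 0
        let k := between + 1
        if 1 ≤ k ∧ k ≤ 4 then pvIncAt N k else N) ([0, 0, 0, 0, 0] : List Int))
      = (pv.foldl (fun N x =>
        let k := PySem.Dict.getD (pv.foldl (fun c z =>
            (PySem.Set.ofList (PySem.Dict.getD d z [])).foldl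
              (fun c y => if c.contains y then c.modify y 0 (· + 1) else c) c)
            (pv.foldl (fun c x => c.insert x 0) (PySem.Dict.empty : PySem.Dict Int Int))) x 0 + 1
        if 1 ≤ k ∧ k ≤ 4 then pvIncAt N k else N) ([0, 0, 0, 0, 0] : List Int)) := by
    apply PySem.List.foldl_congr_mem
    intro N x hx
    have hb : (pv.foldl (fun acc z =>
        if x ∈ PySem.Dict.getD d z [] then acc + 1 else acc) (0 : Int))
        = (pv.countP (fun z => decide (x ∈ PySem.Dict.getD d z [])) : Int) := by
      rw [PySem.List.foldl_ite_add_one]; simp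
    simp only [hb, hcount x hx]
  rw [hN]
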